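-- pv_equiv track=rewrite | github.com/rickyurvinauc/IIC1103_TAV_2025 | ayudantias/ayudantia3/P13-Listas-Catadores de Comida-B.py | super_estudiantes
-- ===== SOURCE A (Python) =====
-- def super_estudiantes(estudiantes, indicados):
--     # inicializar la lista vacia de super estudiantes
--     super_est = []
--     # variable para llevar el indice del estudiante
--     i = 0
--     # recorrer la lista de estudiantes
--     for estudiante in estudiantes:
--         #asumo que cumple
--         cumple = True
--         # revisar si el estudiante tiene todos los cursos indicados
--         for curso in indicados:
--             #si encuentro uno que falta
--             if curso not in estudiante:
--                 #en ese caso estudiante no cumple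
--                 cumple = False
--                 break
--         if cumple == True:
--             #guardo el indice del estudiante que cumple
--             super_est.append(i)
--         #incremento el indice
--         i += 1
--     #retornar la lista con los indices de los super estudiantes
--     return super_est
-- ===== SOURCE B (Python) =====
-- def super_estudiantes(estudiantes, indicados):
--     # Successive filtering: start with all indices, narrow by each indicated course.
--     candidatos = list(range(len(estudiantes)))
--     for curso in indicados:
--         candidatos = [i for i in candidatos if curso in estudiantes[i]]
--     return candidatos
-- ===== Notes on version B (the rewrite author's own statement) =====
-- stated objective: alternative
-- what changed: B inverts the loop nesting: instead of testing every indicated course per student, it starts from the full list of indices and successively filters it by each indicated course, so the ascending order comes for free.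
import Mathlib
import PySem

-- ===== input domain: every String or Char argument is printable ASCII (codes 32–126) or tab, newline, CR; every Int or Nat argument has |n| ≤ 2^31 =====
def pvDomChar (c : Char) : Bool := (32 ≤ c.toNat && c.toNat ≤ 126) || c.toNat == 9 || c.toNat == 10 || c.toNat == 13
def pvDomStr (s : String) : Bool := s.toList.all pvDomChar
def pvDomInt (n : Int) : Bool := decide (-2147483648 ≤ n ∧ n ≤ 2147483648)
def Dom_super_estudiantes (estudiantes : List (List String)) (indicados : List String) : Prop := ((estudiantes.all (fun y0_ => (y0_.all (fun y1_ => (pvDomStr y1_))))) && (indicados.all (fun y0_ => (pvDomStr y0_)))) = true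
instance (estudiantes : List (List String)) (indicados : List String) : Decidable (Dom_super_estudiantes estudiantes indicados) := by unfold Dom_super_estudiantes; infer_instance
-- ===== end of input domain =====

-- B inverts the loop nesting of A: it starts from all indices and filters by each course; same values, similar cost.

-- ===== PORT A =====
-- inner loop: 'for curso in indicados: if curso not in estudiante: cumple = False; break'
def pvCumple (estudiante : List String) : List String → Bool
  | [] => true
  | curso :: rest => if ¬ (curso ∈ estudiante) then false else pvCumple estudiante rest

def super_estudiantes (estudiantes : List (List String)) (indicados : List String) : List Int :=
  (estudiantes.foldl
    (fun (st : List Int × Int) estudiante =>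
      let cumple := pvCumple estudiante indicados
      let super_est := if cumple = true then st.1 ++ [st.2] else st.1
      (super_est, st.2 + 1))
    ([], 0)).1

-- ===== PORT B =====
-- 'curso in estudiantes[i]': i always comes from range(len(estudiantes)), so the default [] of pyGetD is never used
def super_estudiantes_alt (estudiantes : List (List String)) (indicados : List String) : List Int :=
  let candidatos := PySem.List.pyRange 0 (estudiantes.length : Int) 1
  indicados.foldl
    (fun cand curso =>
      cand.filter (fun i => decide (curso ∈ PySem.List.pyGetD estudiantes i [])))
    candidatos

-- ===== PRECONDITION & SPEC =====
def Spec_super_estudiantes (estudiantes : List (List String)) (indicados : List String) (out : List Int) : Prop := out = super_estudiantes_alt estudiantes indicados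
instance (estudiantes : List (List String)) (indicados : List String) (out : List Int) : Decidable (Spec_super_estudiantes estudiantes indicados out) := by unfold Spec_super_estudiantes; infer_instance

-- ===== CLAIM (what is proved, stated in full; the proofs are below) =====
def Claim_equal_super_estudiantes : Prop := ∀ (estudiantes : List (List String)) (indicados : List String), Dom_super_estudiantes estudiantes indicados → Spec_super_estudiantes estudiantes indicados (super_estudiantes estudiantes indicados)

-- ===== LEMMAS AND PROOFS =====

-- A's inner loop computes "all indicated courses are in the student"
theorem pvCumple_eq_all (estudiante : List String) (ind : List String) :
    pvCumple estudiante ind = ind.all (fun c => decide (c ∈ estudiante)) := by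
  induction ind with
  | nil => rfl
  | cons c rest ih =>
    by_cases h : c ∈ estudiante <;> simp [pvCumple, List.all_cons, ih, h]

-- selection of indices (starting at k) of students satisfying all indicated courses
def pvSel (ind : List String) : List (List String) → Int → List Int
  | [], _ => []
  | e :: es, k =>
    (if ind.all (fun c => decide (c ∈ e)) then [k] else []) ++ pvSel ind es (k + 1)

theorem foldA_eq (ind : List String) :
    ∀ (es : List (List String)) (acc : List Int) (k : Int),
      (es.foldl
        (fun (st : List Int × Int) estudiante =>
          let cumple := pvCumple estudiante ind
          let super_est := if cumple = true then st.1 ++ [st.2] else st.1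
          (super_est, st.2 + 1))
        (acc, k)).1 = acc ++ pvSel ind es k := by
  intro es
  induction es with
  | nil => intro acc k; simp [pvSel]
  | cons e es ih =>
    intro acc k
    cases hb : pvCumple e ind with
    | false =>
      simp only [List.foldl_cons, hb, Bool.false_eq_true, if_false, ih]
      rw [pvCumple_eq_all] at hb
      simp [pvSel, hb]
    | true =>
      simp only [List.foldl_cons, hb, if_true, ih]
      rw [pvCumple_eq_all] at hb
      simp [pvSel, hb]

theorem foldB_eq {α : Type} (p : String → α → Bool) :
    ∀ (ind : List String) (cand : List α),
      (ind.foldl (fun cand curso => cand.filter (p curso)) cand)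
        = cand.filter (fun i => ind.all (fun curso => p curso i)) := by
  intro ind
  induction ind with
  | nil => intro cand; simp
  | cons c rest ih =>
    intro cand
    simp only [List.foldl_cons, ih, List.filter_filter]
    apply List.filter_congr
    intro i _
    simp [Bool.and_comm]

theorem pyGetD_cons_pos (x : List String) (xs : List (List String)) (j : Int)
    (h : 1 ≤ j) :
    PySem.List.pyGetD (x :: xs) j [] = PySem.List.pyGetD xs (j - 1) [] := by
  obtain ⟨n, rfl⟩ : ∃ n : Nat, j = (n : Int) + 1 := ⟨(j - 1).toNat, by omega⟩
  have : ((n : Int) + 1) - 1 = (n : Int) := by omega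
  rw [this]
  have h2 : ((n : Int) + 1) = ((n + 1 : Nat) : Int) := by push_cast; ring
  rw [h2, PySem.List.pyGetD_natCast, PySem.List.pyGetD_natCast]
  simp [List.getD]

theorem filter_range_sel (estudiantes : List (List String)) (ind : List String) :
    ∀ (es : List (List String)) (k : Int),
      (∀ j : Int, 0 ≤ j → j < es.length →
        PySem.List.pyGetD estudiantes (k + j) [] = PySem.List.pyGetD es j []) →
      ((PySem.List.pyRange k (k + es.length) 1).filter
        (fun i => ind.all (fun c => decide (c ∈ PySem.List.pyGetD estudiantes i []))))
        = pvSel ind es k := by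
  intro es
  induction es with
  | nil =>
    intro k _
    simp [pvSel]
  | cons e es ih =>
    intro k hview
    have hlt : k < k + ((e :: es).length : Int) := by
      simp only [List.length_cons]; push_cast; omega
    rw [PySem.List.pyRange_one_cons hlt]
    have hk : PySem.List.pyGetD estudiantes k [] = e := by
      have := hview 0 le_rfl (by simp)
      simpa [PySem.List.pyGetD_zero_cons] using this
    have htail : ((PySem.List.pyRange (k + 1) (k + ((e :: es).length : Int)) 1).filter
        (fun i => ind.all (fun c => decide (c ∈ PySem.List.pyGetD estudiantes i []))))
        = pvSel ind es (k + 1) := by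
      have hb : k + ((e :: es).length : Int) = (k + 1) + (es.length : Int) := by
        simp only [List.length_cons]; push_cast; omega
      rw [hb]
      apply ih
      intro j hj hjlt
      have := hview (j + 1) (by omega) (by simp only [List.length_cons]; push_cast; omega)
      calc PySem.List.pyGetD estudiantes (k + 1 + j) []
          = PySem.List.pyGetD estudiantes (k + (j + 1)) [] := by ring_nf
        _ = PySem.List.pyGetD (e :: es) (j + 1) [] := this
        _ = PySem.List.pyGetD es j [] := by
              rw [pyGetD_cons_pos e es (j + 1) (by omega)]; ring_nf
    simp only [List.filter_cons, hk, htail, pvSel]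
    by_cases h : (ind.all (fun c => decide (c ∈ e))) = true <;> simp [h]

-- ===== VERDICT (by name: the statement is the Claim_ definition above) =====
theorem super_estudiantes_spec : Claim_equal_super_estudiantes := by
  intro estudiantes indicados _
  unfold Spec_super_estudiantes super_estudiantes super_estudiantes_alt
  rw [foldA_eq, foldB_eq, List.nil_append]
  have := filter_range_sel estudiantes indicados estudiantes 0 (by intro j _ _; simp)
  simpa using this.symm
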